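-- pv_equiv track=rewrite | github.com/sschepis/tinyaleph-py | tinyaleph/semantic/topology.py | betti_numbers
-- ===== SOURCE A (Python) =====
-- from typing import List, Dict, Tuple, Optional, Any, Callable, Set
--
-- def betti_numbers(vertices: List[int],
--                   edges: List[Tuple[int, int]],
--                   triangles: List[Tuple[int, int, int]]) -> List[int]:
--     """
--     Compute Betti numbers β_0, β_1.
--
--     β_0: number of connected components
--     β_1: number of 1-dimensional holes
--     """
--     n = len(vertices)
--
--     # β_0: Connected components via union-find
--     parent = list(range(n))
--
--     def find(x):
--         if parent[x] != x:
--             parent[x] = find(parent[x])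
--         return parent[x]
--
--     def union(x, y):
--         px, py = find(x), find(y)
--         if px != py:
--             parent[px] = py
--
--     for i, j in edges:
--         union(i, j)
--
--     beta_0 = len(set(find(i) for i in range(n)))
--
--     # β_1: Euler characteristic formula
--     # χ = V - E + F and χ = β_0 - β_1 + β_2
--     # For 2D: β_1 = β_0 - χ = β_0 - V + E - F + β_2
--     # Approximate β_2 ≈ |triangles| (not exact but useful)
--     chi = n - len(edges) + len(triangles)
--     beta_1 = beta_0 - chi  # Assuming β_2 ≈ 0 for most practical cases
--
--     return [beta_0, max(0, beta_1)]
-- ===== SOURCE B (Python) =====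
-- def betti_numbers(vertices, edges, triangles):
--     """
--     Compute Betti numbers beta_0, beta_1 by iterative label propagation:
--     every vertex starts in its own class; each edge merges the two classes
--     of its endpoints by relabelling.
--     """
--     n = len(vertices)
--     comp = list(range(n))
--     for i, j in edges:
--         a, b = comp[i], comp[j]
--         if a != b:
--             comp = [b if c == a else c for c in comp]
--     beta_0 = len(set(comp))
--     chi = n - len(edges) + len(triangles)
--     beta_1 = beta_0 - chi
--     return [beta_0, max(0, beta_1)]
-- ===== Notes on version B (the rewrite author's own statement) =====
-- stated objective: simpler
-- what changed: Replaced the recursive path-compressing union-find (mutable parent array, nested find/union closures) by a flat iterative label propagation: each edge merges its two endpoint labels by one relabelling pass over the label list; beta_1 arithmetic unchanged. Simpler and recursion-free, but O(E*V), i.e. slower than A on large inputs.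
import Mathlib
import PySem

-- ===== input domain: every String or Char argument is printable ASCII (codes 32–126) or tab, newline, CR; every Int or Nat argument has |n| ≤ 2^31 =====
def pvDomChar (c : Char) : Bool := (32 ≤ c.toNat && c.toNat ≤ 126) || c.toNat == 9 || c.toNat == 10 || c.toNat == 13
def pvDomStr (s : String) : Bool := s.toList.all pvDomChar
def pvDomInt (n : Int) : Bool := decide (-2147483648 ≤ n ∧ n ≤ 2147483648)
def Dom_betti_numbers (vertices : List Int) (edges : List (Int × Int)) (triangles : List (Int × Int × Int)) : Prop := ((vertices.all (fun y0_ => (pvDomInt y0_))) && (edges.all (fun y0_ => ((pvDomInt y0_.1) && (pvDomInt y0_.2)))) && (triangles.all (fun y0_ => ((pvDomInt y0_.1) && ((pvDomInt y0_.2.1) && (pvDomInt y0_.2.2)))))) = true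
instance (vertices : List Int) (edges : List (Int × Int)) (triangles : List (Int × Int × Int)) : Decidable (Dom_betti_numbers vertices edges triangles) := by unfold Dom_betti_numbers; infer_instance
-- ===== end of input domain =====

-- B replaces A's recursive path-compressing union-find by a flat iterative label
-- propagation (one relabelling pass per merging edge): simpler and recursion-free,
-- at the cost of O(E*V) instead of near-linear work on large inputs.

-- ===== PORT A =====
-- A's inner `find` (recursive, with path compression); mutation of `parent` is
-- threaded as the first component.  Python's recursion is structural on the
-- parent chain; the port uses explicit fuel (n+2 always suffices, proved below),
-- and `none` marks IndexError (excluded by Pre_).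
def findA (fuel : Nat) (p : List Int) (x : Int) : Option (List Int × Int) :=
  match fuel with
  | 0 => none
  | Nat.succ f =>
    (PySem.List.pyGet? p x).bind fun px =>            -- parent[x] (may raise)
      if px ≠ x then
        (findA f p px).bind fun pr =>                 -- find(parent[x])
          (PySem.List.pySet? pr.1 x pr.2).bind fun p2 =>   -- parent[x] = ...
            (PySem.List.pyGet? p2 x).map fun v => (p2, v)  -- return parent[x]
      else some (p, px)

-- A's inner `union`
def unionA (fuel : Nat) (p : List Int) (i j : Int) : Option (List Int) :=
  (findA fuel p i).bind fun pr1 =>                    -- px = find(x)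
    (findA fuel pr1.1 j).bind fun pr2 =>              -- py = find(y)
      if pr1.2 ≠ pr2.2 then PySem.List.pySet? pr2.1 pr1.2 pr2.2   -- parent[px] = py
      else some pr2.1

def betti_numbers (vertices : List Int) (edges : List (Int × Int)) (triangles : List (Int × Int × Int)) : List Int :=
  let n := vertices.length
  let parent0 : List Int := PySem.List.pyRange 0 (n : Int)
  match edges.foldl (fun acc e => acc.bind (fun p => unionA (n + 2) p e.1 e.2)) (some parent0) with
  | none => []    -- IndexError: unreachable under Pre_
  | some p =>
    -- beta_0 = len(set(find(i) for i in range(n)))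
    let st := (List.range n).foldl (fun (st : List Int × List Int) (k : Nat) =>
        match findA (n + 2) st.1 (k : Int) with
        | none => st    -- unreachable: 0 ≤ k < n
        | some pr => (pr.1, st.2 ++ [pr.2])) (p, ([] : List Int))
    let beta0 : Int := PySem.Set.len (PySem.Set.ofList st.2)
    let chi : Int := (n : Int) - edges.length + triangles.length
    let beta1 : Int := beta0 - chi
    [beta0, max 0 beta1]

-- ===== PORT B =====
-- one edge of B's loop: read the two labels, if distinct relabel a -> b
def stepB (comp : List Int) (i j : Int) : Option (List Int) :=
  (PySem.List.pyGet? comp i).bind fun a =>            -- comp[i] (may raise)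
    (PySem.List.pyGet? comp j).bind fun b =>          -- comp[j] (may raise)
      if a ≠ b then some (comp.map fun c => if c = a then b else c) else some comp

def betti_numbers_alt (vertices : List Int) (edges : List (Int × Int)) (triangles : List (Int × Int × Int)) : List Int :=
  let n := vertices.length
  match edges.foldl (fun acc e => acc.bind (fun c => stepB c e.1 e.2)) (some (PySem.List.pyRange 0 (n : Int))) with
  | none => []    -- IndexError: unreachable under Pre_
  | some comp =>
    let beta0 : Int := PySem.Set.len (PySem.Set.ofList comp)
    let chi : Int := (n : Int) - edges.length + triangles.length
    [beta0, max 0 (beta0 - chi)]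

-- ===== PRECONDITION & SPEC =====
-- Pre_ excludes exactly the inputs on which Python A raises IndexError: an edge
-- endpoint outside [-len(vertices), len(vertices)).  (B raises there too.)
def Pre_betti_numbers (vertices : List Int) (edges : List (Int × Int)) (triangles : List (Int × Int × Int)) : Prop :=
  ∀ e ∈ edges, PySem.Raise.InRange vertices.length e.1 ∧ PySem.Raise.InRange vertices.length e.2

instance (vertices : List Int) (edges : List (Int × Int)) (triangles : List (Int × Int × Int)) : Decidable (Pre_betti_numbers vertices edges triangles) := by unfold Pre_betti_numbers; infer_instance

def pvWitness_betti_numbers : List Int × (List (Int × Int)) × (List (Int × Int × Int)) :=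
  ([7, 8, 9], [(0, 1)], [(0, 1, 2)])

def Spec_betti_numbers (vertices : List Int) (edges : List (Int × Int)) (triangles : List (Int × Int × Int)) (out : List Int) : Prop := out = betti_numbers_alt vertices edges triangles
instance (vertices : List Int) (edges : List (Int × Int)) (triangles : List (Int × Int × Int)) (out : List Int) : Decidable (Spec_betti_numbers vertices edges triangles out) := by unfold Spec_betti_numbers; infer_instance

-- ===== CLAIM (what is proved, stated in full; the proofs are below) =====
def Claim_equal_betti_numbers : Prop := ∀ (vertices : List Int) (edges : List (Int × Int)) (triangles : List (Int × Int × Int)), Dom_betti_numbers vertices edges triangles → Pre_betti_numbers vertices edges triangles → Spec_betti_numbers vertices edges triangles (betti_numbers vertices edges triangles)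

-- ===== LEMMAS AND PROOFS =====

-- ---- normalised indexing ----
-- the slot (Nat index) a Python index i addresses in a list of length n
def slotNat (n : Nat) (i : Int) : Nat := if 0 ≤ i then i.toNat else n - (-i).toNat

theorem slotNat_lt {n : Nat} {i : Int} (h : PySem.Raise.InRange n i) : slotNat n i < n := by
  rcases h with ⟨h1, h2⟩; unfold slotNat; split <;> omega

theorem slotNat_natCast (n : Nat) (k : Nat) : slotNat n (k : Int) = k := by
  unfold slotNat; simp

theorem pyIdx?_eq_slotNat {n : Nat} {i : Int} (h : PySem.Raise.InRange n i) :
    PySem.List.pyIdx? n i = some (slotNat n i) := by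
  rcases h with ⟨h1, h2⟩
  unfold PySem.List.pyIdx? slotNat
  split <;> simp_all

theorem pyGet?_eq_slot {p : List Int} {i : Int} (h : PySem.Raise.InRange p.length i) :
    PySem.List.pyGet? p i = p[slotNat p.length i]? := by
  unfold PySem.List.pyGet?
  rw [pyIdx?_eq_slotNat h]; rfl

theorem pySet?_eq_slot {p : List Int} {i : Int} (v : Int) (h : PySem.Raise.InRange p.length i) :
    PySem.List.pySet? p i v = some (p.set (slotNat p.length i) v) := by
  unfold PySem.List.pySet?
  rw [pyIdx?_eq_slotNat h]; rfl

theorem inRange_of_pyGet?_eq_some {p : List Int} {i : Int} {v : Int}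
    (h : PySem.List.pyGet? p i = some v) : PySem.Raise.InRange p.length i := by
  by_contra hc
  rw [← PySem.List.pyGet?_eq_none_iff] at hc
  simp [hc] at h

-- reading after a set at slot s
theorem pyGet?_set {p : List Int} {s : Nat} {v : Int} {y : Int} (hl : s < p.length) :
    PySem.List.pyGet? (p.set s v) y =
      if PySem.Raise.InRange p.length y ∧ slotNat p.length y = s then some v
      else PySem.List.pyGet? p y := by
  by_cases hy : PySem.Raise.InRange p.length y
  · have e1 : PySem.List.pyGet? (p.set s v) y = (p.set s v)[slotNat p.length y]? := by
      have h2 : PySem.Raise.InRange (p.set s v).length y := by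
        simpa using hy
      rw [pyGet?_eq_slot h2]; simp
    rw [e1, pyGet?_eq_slot hy, List.getElem?_set]
    by_cases hs : slotNat p.length y = s
    · simp [hs, hl, hy]
    · have hs' : ¬ (s = slotNat p.length y) := fun h => hs h.symm
      simp [hs, hs', hy]
  · have h2 : PySem.List.pyGet? (p.set s v) y = none := by
      rw [PySem.List.pyGet?_eq_none_iff]; simpa using hy
    rw [h2]
    have h3 : PySem.List.pyGet? p y = none := by
      rw [PySem.List.pyGet?_eq_none_iff]; exact hy
    simp [hy, h3]

-- ---- the pure root chase (what A's find returns, ignoring compression) ----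
def rootF : Nat → List Int → Int → Option Int
  | 0, _, _ => none
  | Nat.succ f, p, x =>
    (PySem.List.pyGet? p x).bind fun px => if px = x then some x else rootF f p px

theorem rootF_succ (f : Nat) (p : List Int) (x : Int) :
    rootF (f + 1) p x
      = (PySem.List.pyGet? p x).bind fun px => if px = x then some x else rootF f p px := by
  rfl

theorem rootF_mono {f g : Nat} {p : List Int} {x r : Int}
    (h : rootF f p x = some r) (hfg : f ≤ g) : rootF g p x = some r := by
  induction f generalizing g x with
  | zero => simp [rootF] at h
  | succ f ih =>
    obtain ⟨g', rfl⟩ : ∃ g', g = g' + 1 := ⟨g - 1, by omega⟩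
    unfold rootF at h ⊢
    cases hpx : PySem.List.pyGet? p x with
    | none => rw [hpx] at h; simp at h
    | some px =>
      rw [hpx] at h
      rw [Option.bind_some] at h ⊢
      by_cases he : px = x
      · simpa [he] using h
      · simp only [he, if_false] at h ⊢
        exact ih h (by omega)

theorem rootF_det {f g : Nat} {p : List Int} {x r r' : Int}
    (h : rootF f p x = some r) (h' : rootF g p x = some r') : r = r' := by
  rcases Nat.le_total f g with hle | hle
  · rw [rootF_mono h hle] at h'; exact Option.some.inj h'
  · rw [rootF_mono h' hle] at h; exact (Option.some.inj h).symm

theorem rootF_fix {f : Nat} {p : List Int} {x r : Int}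
    (h : rootF f p x = some r) : PySem.List.pyGet? p r = some r := by
  induction f generalizing x with
  | zero => simp [rootF] at h
  | succ f ih =>
    unfold rootF at h
    cases hpx : PySem.List.pyGet? p x with
    | none => rw [hpx] at h; simp at h
    | some px =>
      rw [hpx, Option.bind_some] at h
      by_cases he : px = x
      · obtain rfl : x = r := by simpa [he] using h
        rw [hpx, he]
      · simp only [he, if_false] at h
        exact ih h

theorem rootF_mem {f : Nat} {p : List Int} {x r : Int}
    (h : rootF f p x = some r) : r = x ∨ r ∈ p := by
  induction f generalizing x with
  | zero => simp [rootF] at h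
  | succ f ih =>
    unfold rootF at h
    cases hpx : PySem.List.pyGet? p x with
    | none => rw [hpx] at h; simp at h
    | some px =>
      rw [hpx, Option.bind_some] at h
      by_cases he : px = x
      · obtain rfl : x = r := by simpa [he] using h
        left; rfl
      · simp only [he, if_false] at h
        rcases ih h with h1 | h1
        · right; rw [h1]; exact PySem.List.mem_of_pyGet?_eq_some p hpx
        · right; exact h1

theorem rootF_of_fix {f : Nat} {p : List Int} {x : Int}
    (h : PySem.List.pyGet? p x = some x) : rootF (f + 1) p x = some x := by
  simp [rootF, h]

-- ---- invariants ----
def RangeOK (n : Nat) (p : List Int) : Prop :=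
  p.length = n ∧ ∀ v ∈ p, 0 ≤ v ∧ v < (n : Int)

def Roots (n : Nat) (p : List Int) : Prop :=
  ∀ k : Nat, k < n → ∃ r, rootF (n + 2) p (k : Int) = some r

def Corr (n : Nat) (p comp : List Int) : Prop :=
  comp.length = n ∧ ∀ x y : Nat, x < n → y < n →
    (rootF (n + 2) p (x : Int) = rootF (n + 2) p (y : Int) ↔ comp[x]? = comp[y]?)

def UFInv (n : Nat) (p comp : List Int) : Prop :=
  RangeOK n p ∧ Roots n p ∧ Corr n p comp

-- forward preservation of root values between two parent arrays, at every fuel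
def Pres (p q : List Int) : Prop :=
  ∀ (f : Nat) (y r : Int), rootF f p y = some r → rootF f q y = some r

-- ---- the visited path, used only to bound the fuel ----
def pathF : Nat → List Int → Int → Option (List Int)
  | 0, _, _ => none
  | Nat.succ f, p, x =>
    (PySem.List.pyGet? p x).bind fun px => if px = x then some [x] else (pathF f p px).map (x :: ·)

theorem pathF_mono {f g : Nat} {p : List Int} {x : Int} {L : List Int}
    (h : pathF f p x = some L) (hfg : f ≤ g) : pathF g p x = some L := by
  induction f generalizing g x L with
  | zero => simp [pathF] at h
  | succ f ih =>
    obtain ⟨g', rfl⟩ : ∃ g', g = g' + 1 := ⟨g - 1, by omega⟩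
    unfold pathF at h ⊢
    cases hpx : PySem.List.pyGet? p x with
    | none => rw [hpx] at h; simp at h
    | some px =>
      rw [hpx] at h
      rw [Option.bind_some] at h ⊢
      by_cases he : px = x
      · simpa [he] using h
      · simp only [he, if_false, Option.map_eq_some_iff] at h ⊢
        obtain ⟨L', hL', rfl⟩ := h
        exact ⟨L', ih hL' (by omega), rfl⟩

theorem path_of_root {f : Nat} {p : List Int} {x r : Int}
    (h : rootF f p x = some r) :
    ∃ L, pathF f p x = some L ∧ rootF L.length p x = some r := by
  induction f generalizing x with
  | zero => simp [rootF] at h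
  | succ f ih =>
    unfold rootF at h
    cases hpx : PySem.List.pyGet? p x with
    | none => rw [hpx] at h; simp at h
    | some px =>
      rw [hpx, Option.bind_some] at h
      by_cases he : px = x
      · obtain rfl : x = r := by simpa [he] using h
        exact ⟨[x], by simp [pathF, hpx, he], by simp [rootF, hpx, he]⟩
      · simp only [he, if_false] at h
        obtain ⟨L', hL', hroot⟩ := ih h
        refine ⟨x :: L', ?_, ?_⟩
        · unfold pathF; rw [hpx]; simp [he, hL']
        · show rootF (L'.length + 1) p x = some r
          unfold rootF; rw [hpx]; simp [he, hroot]

theorem path_suffix {f : Nat} {p : List Int} {x : Int} {L : List Int}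
    (h : pathF f p x = some L) : ∀ a ∈ L, ∃ g M, g ≤ f ∧ pathF g p a = some M ∧ M <:+ L := by
  induction f generalizing x L with
  | zero => simp [pathF] at h
  | succ f ih =>
    unfold pathF at h
    cases hpx : PySem.List.pyGet? p x with
    | none => rw [hpx] at h; simp at h
    | some px =>
      rw [hpx, Option.bind_some] at h
      by_cases he : px = x
      · obtain rfl : [x] = L := by simpa [he] using h
        intro a ha
        rw [List.mem_singleton] at ha
        subst ha
        exact ⟨f + 1, [a], le_refl _, by simp [pathF, hpx, he], List.suffix_refl _⟩
      · simp only [he, if_false, Option.map_eq_some_iff] at h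
        obtain ⟨L', hL', rfl⟩ := h
        intro a ha
        rcases List.mem_cons.mp ha with rfl | ha'
        · exact ⟨f + 1, a :: L', le_refl _, by unfold pathF; rw [hpx]; simp [he, hL'],
            List.suffix_refl _⟩
        · obtain ⟨g, M, hg, hM, hsuf⟩ := ih hL' a ha'
          exact ⟨g, M, by omega, hM, hsuf.trans (List.suffix_cons x L')⟩

theorem path_nodup {f : Nat} {p : List Int} {x : Int} {L : List Int}
    (h : pathF f p x = some L) : L.Nodup := by
  induction f generalizing x L with
  | zero => simp [pathF] at h
  | succ f ih =>
    unfold pathF at h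
    cases hpx : PySem.List.pyGet? p x with
    | none => rw [hpx] at h; simp at h
    | some px =>
      rw [hpx, Option.bind_some] at h
      by_cases he : px = x
      · obtain rfl : [x] = L := by simpa [he] using h
        simp
      · simp only [he, if_false, Option.map_eq_some_iff] at h
        obtain ⟨L', hL', rfl⟩ := h
        refine List.nodup_cons.mpr ⟨?_, ih hL'⟩
        intro hx
        obtain ⟨g, M, hg, hM, hsuf⟩ := path_suffix hL' x hx
        have hM2 : pathF (f + 1) p x = some M := pathF_mono hM (by omega)
        have hM3 : pathF (f + 1) p x = some (x :: L') := by
          unfold pathF; rw [hpx]; simp [he, hL']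
        rw [hM3] at hM2
        obtain rfl : x :: L' = M := by simpa using hM2
        have := hsuf.length_le
        simp at this

theorem path_mem {f : Nat} {p : List Int} {x : Int} {L : List Int}
    (h : pathF f p x = some L) : ∀ a ∈ L, a = x ∨ a ∈ p := by
  induction f generalizing x L with
  | zero => simp [pathF] at h
  | succ f ih =>
    unfold pathF at h
    cases hpx : PySem.List.pyGet? p x with
    | none => rw [hpx] at h; simp at h
    | some px =>
      rw [hpx, Option.bind_some] at h
      by_cases he : px = x
      · obtain rfl : [x] = L := by simpa [he] using h
        intro a ha; left; simpa using ha
      · simp only [he, if_false, Option.map_eq_some_iff] at h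
        obtain ⟨L', hL', rfl⟩ := h
        intro a ha
        rcases List.mem_cons.mp ha with rfl | ha'
        · left; rfl
        · rcases ih hL' a ha' with rfl | hmem
          · right; exact PySem.List.mem_of_pyGet?_eq_some p hpx
          · right; exact hmem

-- fuel n+2 always suffices on a range-valid parent array
theorem rootF_norm {n : Nat} {p : List Int} {x r : Int} {f : Nat}
    (hp : RangeOK n p) (h : rootF f p x = some r) : rootF (n + 2) p x = some r := by
  obtain ⟨L, hL, hroot⟩ := path_of_root h
  have hnd : L.Nodup := path_nodup hL
  have hmem : ∀ a ∈ L, a = x ∨ a ∈ p := path_mem hL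
  have hsub : L.toFinset ⊆ insert x (Finset.Ico (0 : Int) (n : Int)) := by
    intro a ha
    rcases hmem a (List.mem_toFinset.mp ha) with rfl | hmem'
    · exact Finset.mem_insert_self _ _
    · have := hp.2 a hmem'
      exact Finset.mem_insert_of_mem (Finset.mem_Ico.mpr ⟨this.1, this.2⟩)
    
  have hcard : L.length ≤ n + 1 := by
    have h1 : L.toFinset.card = L.length := List.toFinset_card_of_nodup hnd
    have h2 := Finset.card_le_card hsub
    have h3 : (insert x (Finset.Ico (0 : Int) (n : Int))).card ≤ n + 1 := by
      have := Finset.card_insert_le x (Finset.Ico (0 : Int) (n : Int))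
      have h4 : (Finset.Ico (0 : Int) (n : Int)).card = n := by rw [Int.card_Ico]; omega
      omega
    omega
  exact rootF_mono hroot (by omega)

-- one step along the chain keeps the root
theorem rootF_step {f : Nat} {p : List Int} {x v r : Int}
    (h : rootF f p x = some r) (hv : PySem.List.pyGet? p x = some v) :
    rootF f p v = some r := by
  obtain ⟨f', rfl⟩ : ∃ f', f = f' + 1 := by
    cases f with
    | zero => simp [rootF] at h
    | succ f' => exact ⟨f', rfl⟩
  unfold rootF at h
  rw [hv, Option.bind_some] at h
  by_cases he : v = x
  · obtain rfl : x = r := by simpa [he] using h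
    subst he
    exact rootF_of_fix hv
  · simp only [he, if_false] at h
    exact rootF_mono h (by omega)

-- ---- state changes preserve / transform roots ----
-- path compression: writing some node's root into its slot changes no root
theorem W1 {n : Nat} {p : List Int} {x r : Int} {h0 : Nat}
    (hp : RangeOK n p) (hx : rootF h0 p x = some r) :
    ∀ (g : Nat) (y r' : Int), rootF g p y = some r' →
      rootF g (p.set (slotNat n x) r) y = some r' := by
  obtain ⟨hlen, hval⟩ := hp
  subst hlen
  have hxin : PySem.Raise.InRange p.length x := by
    obtain ⟨h1, rfl⟩ : ∃ h1, h0 = h1 + 1 := by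
      cases h0 with
      | zero => simp [rootF] at hx
      | succ h1 => exact ⟨h1, rfl⟩
    unfold rootF at hx
    cases hq : PySem.List.pyGet? p x with
    | none => rw [hq] at hx; simp at hx
    | some w => exact inRange_of_pyGet?_eq_some hq
  have hslt : slotNat p.length x < p.length := slotNat_lt hxin
  have hfixr : PySem.List.pyGet? p r = some r := rootF_fix hx
  intro g
  induction g with
  | zero => intro y r' h; simp [rootF] at h
  | succ g ih =>
    intro y r' h
    unfold rootF at h ⊢
    cases hpy : PySem.List.pyGet? p y with
    | none => rw [hpy] at h; simp at h
    | some v =>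
      rw [hpy, Option.bind_some] at h
      rw [pyGet?_set hslt]
      by_cases hc : PySem.Raise.InRange p.length y ∧ slotNat p.length y = slotNat p.length x
      · rw [if_pos hc, Option.bind_some]
        have hsame : PySem.List.pyGet? p y = PySem.List.pyGet? p x := by
          rw [pyGet?_eq_slot hc.1, pyGet?_eq_slot hxin, hc.2]
        have hvx_read : PySem.List.pyGet? p x = some v := by rw [← hsame, hpy]
        have hrv : rootF h0 p v = some r := rootF_step hx hvx_read
        by_cases hvy : v = y
        · obtain rfl : y = r' := by simpa [hvy] using h
          subst hvy
          have hfy : rootF h0 p v = some v := by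
            obtain ⟨h1, rfl⟩ : ∃ h1, h0 = h1 + 1 := by
              cases h0 with
              | zero => simp [rootF] at hrv
              | succ h1 => exact ⟨h1, rfl⟩
            exact rootF_of_fix hpy
          have hry : r = v := rootF_det hrv hfy
          rw [if_pos hry]
        · simp only [hvy, if_false] at h
          have hrr' : r' = r := rootF_det h hrv
          by_cases hry : r = y
          · rw [if_pos hry, hrr', hry]
          · rw [if_neg hry]
            obtain ⟨g1, rfl⟩ : ∃ g1, g = g1 + 1 := by
              cases g with
              | zero => simp [rootF] at h
              | succ g1 => exact ⟨g1, rfl⟩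
            have hfix' : PySem.List.pyGet? (p.set (slotNat p.length x) r) r = some r := by
              rw [pyGet?_set hslt]
              split
              · rfl
              · exact hfixr
            rw [rootF_of_fix hfix', hrr']
      · rw [if_neg hc, hpy, Option.bind_some]
        by_cases hvy : v = y
        · simpa [hvy] using h
        · simp only [hvy, if_false] at h ⊢
          exact ih v r' h

-- union: writing root b into root a's slot maps root a to b, fixes the others
theorem W2 {n : Nat} {p : List Int} {a b : Int}
    (hp : RangeOK n p) (ha0 : 0 ≤ a) (han : a < (n : Int)) (hb0 : 0 ≤ b) (hbn : b < (n : Int))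
    (hra : PySem.List.pyGet? p a = some a) (hrb : PySem.List.pyGet? p b = some b) (hab : a ≠ b) :
    ∀ (g : Nat) (y r' : Int), rootF g p y = some r' →
      rootF (g + 1) (p.set a.toNat b) y = some (if r' = a then b else r') := by
  obtain ⟨hlen, hval⟩ := hp
  subst hlen
  have hain : PySem.Raise.InRange p.length a := ⟨by omega, han⟩
  have hbin : PySem.Raise.InRange p.length b := ⟨by omega, hbn⟩
  have hsa : slotNat p.length a = a.toNat := by unfold slotNat; rw [if_pos ha0]
  have hsb : slotNat p.length b = b.toNat := by unfold slotNat; rw [if_pos hb0]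
  have hslt : a.toNat < p.length := by have := slotNat_lt hain; omega
  have hfixb' : PySem.List.pyGet? (p.set a.toNat b) b = some b := by
    rw [pyGet?_set hslt]
    rw [if_neg]
    · exact hrb
    · rintro ⟨h1, h2⟩
      rw [hsb] at h2
      omega
  intro g
  induction g with
  | zero => intro y r' h; simp [rootF] at h
  | succ g ih =>
    intro y r' h
    unfold rootF at h
    rw [show (g + 1) + 1 = (g + 1) + 1 from rfl, rootF_succ]
    cases hpy : PySem.List.pyGet? p y with
    | none => rw [hpy] at h; simp at h
    | some v =>
      rw [hpy, Option.bind_some] at h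
      rw [pyGet?_set hslt]
      by_cases hc : PySem.Raise.InRange p.length y ∧ slotNat p.length y = a.toNat
      · rw [if_pos hc, Option.bind_some]
        have hsame : PySem.List.pyGet? p y = PySem.List.pyGet? p a := by
          rw [pyGet?_eq_slot hc.1, pyGet?_eq_slot hain, hc.2, hsa]
        have hva : v = a := by
          have h9 := hsame.symm.trans hpy
          rw [hra] at h9
          exact (Option.some.inj h9).symm
        rw [hva] at h
        have hbny : ¬ (b = y) := by
          intro hby
          rcases hc with ⟨hc1, hc2⟩
          have : 0 ≤ y := by omega
          have : slotNat p.length y = y.toNat := by unfold slotNat; rw [if_pos this]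
          omega
        rw [if_neg hbny]
        have hres : rootF (g + 1) (p.set a.toNat b) b = some b := by
          exact rootF_of_fix hfixb'
        by_cases hvy : a = y
        · obtain rfl : y = r' := by simpa [hvy] using h
          rw [hres, if_pos hvy.symm]
        · simp only [hvy, if_false] at h
          have hfa : rootF g p a = some a := by
            obtain ⟨g1, rfl⟩ : ∃ g1, g = g1 + 1 := by
              cases g with
              | zero => simp [rootF] at h
              | succ g1 => exact ⟨g1, rfl⟩
            exact rootF_of_fix hra
          obtain rfl : r' = a := rootF_det h hfa
          rw [hres, if_pos rfl]
      · rw [if_neg hc, hpy, Option.bind_some]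
        by_cases hvy : v = y
        · have hyr : r' = y := by
            have h8 : y = r' := by simpa [hvy] using h
            exact h8.symm
          have hya : ¬ (y = a) := by
            intro hra'
            exact hc ⟨by rw [hra']; exact hain, by rw [hra', hsa]⟩
          rw [if_pos hvy, hyr, if_neg hya]
        · simp only [hvy, if_false] at h ⊢
          exact ih v r' h

-- ---- characterisation of findA ----
theorem findA_succ (f : Nat) (p : List Int) (x : Int) :
    findA (f + 1) p x = (PySem.List.pyGet? p x).bind fun px =>
      if px ≠ x then
        (findA f p px).bind fun pr =>
          (PySem.List.pySet? pr.1 x pr.2).bind fun p2 =>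
            (PySem.List.pyGet? p2 x).map fun v => (p2, v)
      else some (p, px) := by
  rfl

theorem findA_sound {n : Nat} : ∀ (g : Nat) (p : List Int) (x : Int) (res : List Int × Int),
    RangeOK n p → findA g p x = some res →
    rootF g p x = some res.2 ∧ RangeOK n res.1 ∧ Pres p res.1 := by
  intro g
  induction g with
  | zero => intro p x res hp h; simp [findA] at h
  | succ f ih =>
    intro p x res hp h
    rw [findA_succ] at h
    cases hpx : PySem.List.pyGet? p x with
    | none => rw [hpx] at h; simp at h
    | some px =>
      rw [hpx, Option.bind_some] at h
      by_cases he : px = x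
      · rw [if_neg (by simpa using he)] at h
        obtain rfl : (p, px) = res := by simpa using h
        subst he
        refine ⟨rootF_of_fix hpx, hp, fun f y r hr => hr⟩
      · rw [if_pos (by simpa using he)] at h
        cases hfa : findA f p px with
        | none => rw [hfa] at h; simp at h
        | some pr =>
          rw [hfa, Option.bind_some] at h
          obtain ⟨hroot, hrok1, hpres1⟩ := ih p px pr hp hfa
          have hxin : PySem.Raise.InRange p.length x := inRange_of_pyGet?_eq_some hpx
          have hxin1 : PySem.Raise.InRange pr.1.length x := by
            rw [hrok1.1, ← hp.1]; exact hxin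
          have hslt1 : slotNat pr.1.length x < pr.1.length := slotNat_lt hxin1
          rw [pySet?_eq_slot pr.2 hxin1, Option.bind_some] at h
          have hget2 : PySem.List.pyGet? (pr.1.set (slotNat pr.1.length x) pr.2) x = some pr.2 := by
            rw [pyGet?_set hslt1, if_pos ⟨hxin1, rfl⟩]
          rw [hget2] at h
          obtain rfl : (pr.1.set (slotNat pr.1.length x) pr.2, pr.2) = res := by simpa using h
          have hrootx : rootF (f + 1) p x = some pr.2 := by
            rw [rootF_succ, hpx, Option.bind_some, if_neg he]
            exact hroot
          have hrmem : 0 ≤ pr.2 ∧ pr.2 < (n : Int) := by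
            rcases rootF_mem hroot with h1 | h1
            · rw [h1]; exact hp.2 px (PySem.List.mem_of_pyGet?_eq_some p hpx)
            · exact hp.2 pr.2 h1
          have hrok2 : RangeOK n (pr.1.set (slotNat pr.1.length x) pr.2) := by
            refine ⟨by rw [List.length_set]; exact hrok1.1, ?_⟩
            intro v hv
            rcases List.mem_or_eq_of_mem_set hv with h1 | h1
            · exact hrok1.2 v h1
            · rw [h1]; exact hrmem
          refine ⟨hrootx, hrok2, ?_⟩
          have hrootx1 : rootF (f + 1) pr.1 x = some pr.2 := hpres1 _ _ _ hrootx
          have hslot_eq : slotNat pr.1.length x = slotNat n x := by rw [hrok1.1]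
          intro f' y r hr
          rw [← hslot_eq] at *
          exact W1 (n := pr.1.length) ⟨rfl, by
              intro v hv
              have := hrok1.2 v hv
              rw [hrok1.1]; exact this⟩ hrootx1 f' y r (hpres1 f' y r hr)

theorem findA_total {n : Nat} {p : List Int} {x r : Int} {f : Nat}
    (hp : RangeOK n p) (h : rootF f p x = some r) :
    ∃ p', findA (n + 2) p x = some (p', r) := by
  have hx2 : rootF (n + 2) p x = some r := rootF_norm hp h
  clear h
  suffices H : ∀ (g : Nat) (x r : Int), rootF g p x = some r → ∃ p', findA g p x = some (p', r) from
    H (n + 2) x r hx2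
  intro g
  induction g with
  | zero => intro x r h; simp [rootF] at h
  | succ f ih =>
    intro x r h
    rw [rootF_succ] at h
    cases hpx : PySem.List.pyGet? p x with
    | none => rw [hpx] at h; simp at h
    | some px =>
      rw [hpx, Option.bind_some] at h
      rw [findA_succ, hpx, Option.bind_some]
      by_cases he : px = x
      · rw [if_pos he] at h
        obtain rfl : x = r := by simpa using h
        rw [if_neg (by simpa using he)]
        exact ⟨p, by rw [he]⟩
      · rw [if_neg he] at h
        obtain ⟨p1, hfa⟩ := ih px r h
        obtain ⟨_, hrok1, _⟩ := findA_sound (n := n) f p px (p1, r) hp hfa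
        rw [if_pos (by simpa using he), hfa, Option.bind_some]
        have hxin1 : PySem.Raise.InRange p1.length x := by
          rw [hrok1.1, ← hp.1]; exact inRange_of_pyGet?_eq_some hpx
        have hslt1 : slotNat p1.length x < p1.length := slotNat_lt hxin1
        rw [pySet?_eq_slot r hxin1, Option.bind_some]
        rw [pyGet?_set hslt1, if_pos ⟨hxin1, rfl⟩]
        exact ⟨p1.set (slotNat p1.length x) r, rfl⟩

-- a raw (possibly negative) in-range index has the same root as its slot
theorem rootF_slot {n : Nat} {p : List Int} {x : Int}
    (hp : RangeOK n p) (hx : PySem.Raise.InRange n x) :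
    rootF (n + 2) p x = rootF (n + 2) p ((slotNat n x : Nat) : Int) := by
  obtain ⟨hlen, hval⟩ := hp
  by_cases h0 : 0 ≤ x
  · have he : ((slotNat n x : Nat) : Int) = x := by
      unfold slotNat; rw [if_pos h0]; exact Int.toNat_of_nonneg h0
    rw [he]
  · have hkx : ((slotNat n x : Nat) : Int) = x + n := by
      rcases hx with ⟨hx1, hx2⟩
      unfold slotNat; rw [if_neg h0]; omega
    have hslt : slotNat n x < n := slotNat_lt hx
    have hslot_in : PySem.Raise.InRange n ((slotNat n x : Nat) : Int) := by
      constructor <;> omega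
    have hr1 : PySem.List.pyGet? p x = p[slotNat n x]? := by
      have h2 := pyGet?_eq_slot (p := p) (i := x) (by rw [hlen]; exact hx)
      rw [h2, hlen]
    have hr2 : PySem.List.pyGet? p ((slotNat n x : Nat) : Int) = p[slotNat n x]? := by
      have h2 := pyGet?_eq_slot (p := p) (i := ((slotNat n x : Nat) : Int)) (by rw [hlen]; exact hslot_in)
      rw [h2, hlen, slotNat_natCast]
    obtain ⟨v, hv⟩ : ∃ v, p[slotNat n x]? = some v :=
      ⟨p[slotNat n x]'(by omega), List.getElem?_eq_getElem (by omega)⟩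
    have hvmem : v ∈ p := PySem.List.mem_of_pyGet?_eq_some p (hr2.trans hv)
    have hv0 := hval v hvmem
    have e1 : rootF (n + 2) p x
        = (p[slotNat n x]?).bind fun px => if px = x then some x else rootF (n + 1) p px := by
      rw [show n + 2 = (n + 1) + 1 from rfl, rootF_succ, hr1]
    have e2 : rootF (n + 2) p ((slotNat n x : Nat) : Int)
        = (p[slotNat n x]?).bind fun px =>
            if px = ((slotNat n x : Nat) : Int) then some ((slotNat n x : Nat) : Int)
            else rootF (n + 1) p px := by
      rw [show n + 2 = (n + 1) + 1 from rfl, rootF_succ, hr2]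
    rw [e1, e2, hv, Option.bind_some, Option.bind_some]
    have hvx : ¬ (v = x) := by omega
    rw [if_neg hvx]
    by_cases hveq : v = ((slotNat n x : Nat) : Int)
    · rw [if_pos hveq]
      have hfix : PySem.List.pyGet? p v = some v := by
        rw [hveq]; rw [hr2, hv, hveq]
      rw [show (n + 1) = n + 1 from rfl, rootF_of_fix (f := n) hfix, hveq]
    · rw [if_neg hveq]

-- a raw in-range index has a root, equal to its slot's root
theorem roots_raw {n : Nat} {p : List Int} (hp : RangeOK n p) (hroots : Roots n p)
    {i : Int} (hi : PySem.Raise.InRange n i) :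
    ∃ r, rootF (n + 2) p i = some r ∧ rootF (n + 2) p ((slotNat n i : Nat) : Int) = some r := by
  obtain ⟨r, hr⟩ := hroots (slotNat n i) (slotNat_lt hi)
  exact ⟨r, by rw [rootF_slot hp hi]; exact hr, hr⟩

-- merging the classes of ri/rj on the root side and of a/b on the label side
-- turns equal partitions into equal partitions
theorem merge_iff {ri rj a b rx ry cx cy : Int}
    (k1 : rx = ri ↔ cx = a) (k2 : ry = ri ↔ cy = a)
    (k3 : ry = rj ↔ cy = b) (k4 : rx = rj ↔ cx = b)
    (k5 : rx = ry ↔ cx = cy) :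
    ((if rx = ri then rj else rx) = (if ry = ri then rj else ry)) ↔
    ((if cx = a then b else cx) = (if cy = a then b else cy)) := by
  by_cases h1 : rx = ri <;> by_cases h2 : ry = ri
  · rw [if_pos h1, if_pos h2, if_pos (k1.mp h1), if_pos (k2.mp h2)]
    exact ⟨fun _ => rfl, fun _ => rfl⟩
  · rw [if_pos h1, if_neg h2, if_pos (k1.mp h1), if_neg (fun hc => h2 (k2.mpr hc))]
    exact ⟨fun h => (k3.mp h.symm).symm, fun h => (k3.mpr h.symm).symm⟩
  · rw [if_neg h1, if_pos h2, if_neg (fun hc => h1 (k1.mpr hc)), if_pos (k2.mp h2)]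
    exact ⟨fun h => k4.mp h, fun h => k4.mpr h⟩
  · rw [if_neg h1, if_neg h2, if_neg (fun hc => h1 (k1.mpr hc)),
      if_neg (fun hc => h2 (k2.mpr hc))]
    exact k5

-- ---- one edge, in lockstep ----
theorem union_step {n : Nat} {p comp : List Int} {i j : Int}
    (hI : UFInv n p comp) (hi : PySem.Raise.InRange n i) (hj : PySem.Raise.InRange n j) :
    ∃ p2 comp2, unionA (n + 2) p i j = some p2 ∧ stepB comp i j = some comp2 ∧
      UFInv n p2 comp2 := by
  obtain ⟨hrok, hroots, hclen, hiff⟩ := hI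
  obtain ⟨ri, hri, hri_s⟩ := roots_raw hrok hroots hi
  obtain ⟨rj, hrj, hrj_s⟩ := roots_raw hrok hroots hj
  obtain ⟨p1, hfind1⟩ := findA_total hrok hri
  obtain ⟨hroot1, hrok1, hpres1⟩ := findA_sound (n + 2) p i (p1, ri) hrok hfind1
  dsimp only at hroot1 hrok1 hpres1
  have hrj1 : rootF (n + 2) p1 j = some rj := hpres1 _ _ _ hrj
  obtain ⟨p2', hfind2⟩ := findA_total hrok1 hrj1
  obtain ⟨hroot2, hrok2, hpres2⟩ := findA_sound (n + 2) p1 j (p2', rj) hrok1 hfind2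
  dsimp only at hroot1 hrok1 hpres1 hroot2 hrok2 hpres2 hfind2
  have hpres12 : Pres p p2' := fun f y r h => hpres2 f y r (hpres1 f y r h)
  -- B's two reads
  have hcomp_i : PySem.List.pyGet? comp i = comp[slotNat n i]? := by
    have := pyGet?_eq_slot (p := comp) (i := i) (by rw [hclen]; exact hi)
    rw [this, hclen]
  have hcomp_j : PySem.List.pyGet? comp j = comp[slotNat n j]? := by
    have := pyGet?_eq_slot (p := comp) (i := j) (by rw [hclen]; exact hj)
    rw [this, hclen]
  obtain ⟨a, ha⟩ : ∃ a, comp[slotNat n i]? = some a :=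
    ⟨comp[slotNat n i]'(by rw [hclen]; exact slotNat_lt hi), List.getElem?_eq_getElem _⟩
  obtain ⟨b, hb⟩ : ∃ b, comp[slotNat n j]? = some b :=
    ⟨comp[slotNat n j]'(by rw [hclen]; exact slotNat_lt hj), List.getElem?_eq_getElem _⟩
  -- branch agreement
  have hbranch : ri = rj ↔ a = b := by
    have h5 := hiff (slotNat n i) (slotNat n j) (slotNat_lt hi) (slotNat_lt hj)
    rw [hri_s, hrj_s, ha, hb] at h5
    constructor
    · intro h; exact Option.some.inj (h5.mp (by rw [h]))
    · intro h; exact Option.some.inj (h5.mpr (by rw [h]))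
  have hA0 : unionA (n + 2) p i j
      = if ri ≠ rj then PySem.List.pySet? p2' ri rj else some p2' := by
    unfold unionA
    rw [hfind1, Option.bind_some, hfind2, Option.bind_some]
  have hB0 : stepB comp i j
      = if a ≠ b then some (comp.map fun c => if c = a then b else c) else some comp := by
    unfold stepB
    rw [hcomp_i, ha, Option.bind_some, hcomp_j, hb, Option.bind_some]
  by_cases hcase : ri = rj
  · have hab : a = b := hbranch.mp hcase
    refine ⟨p2', comp, by rw [hA0, if_neg (by simpa using hcase)],
      by rw [hB0, if_neg (by simpa using hab)], hrok2, ?_, hclen, ?_⟩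
    · intro k hk
      obtain ⟨r, hr⟩ := hroots k hk
      exact ⟨r, hpres12 _ _ _ hr⟩
    · intro x y hx hy
      obtain ⟨rx, hrx⟩ := hroots x hx
      obtain ⟨ry, hry⟩ := hroots y hy
      have h6 := hiff x y hx hy
      rw [hrx, hry] at h6
      rw [hpres12 _ _ _ hrx, hpres12 _ _ _ hry]
      exact h6
  · have hab : a ≠ b := fun h => hcase (hbranch.mpr h)
    have hri_b : 0 ≤ ri ∧ ri < (n : Int) := by
      rcases rootF_mem hri_s with h1 | h1
      · constructor <;> [rw [h1]; rw [h1]] <;> [positivity; exact_mod_cast slotNat_lt hi]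
      · exact hrok.2 ri h1
    have hrj_b : 0 ≤ rj ∧ rj < (n : Int) := by
      rcases rootF_mem hrj_s with h1 | h1
      · constructor <;> [rw [h1]; rw [h1]] <;> [positivity; exact_mod_cast slotNat_lt hj]
      · exact hrok.2 rj h1
    have hfixi : PySem.List.pyGet? p2' ri = some ri := rootF_fix (hpres12 _ _ _ hri)
    have hfixj : PySem.List.pyGet? p2' rj = some rj := rootF_fix (hpres12 _ _ _ hrj)
    have hset : PySem.List.pySet? p2' ri rj = some (p2'.set ri.toNat rj) := by
      have hin : PySem.Raise.InRange p2'.length ri := by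
        rw [hrok2.1]; exact ⟨by omega, hri_b.2⟩
      rw [pySet?_eq_slot rj hin]
      congr 1
      unfold slotNat
      rw [if_pos hri_b.1]
    set p3 := p2'.set ri.toNat rj with hp3
    have hrok3 : RangeOK n p3 := by
      refine ⟨by rw [hp3, List.length_set]; exact hrok2.1, ?_⟩
      intro v hv
      rcases List.mem_or_eq_of_mem_set hv with h1 | h1
      · exact hrok2.2 v h1
      · rw [h1]; exact hrj_b
    have HW2 := W2 hrok2 hri_b.1 hri_b.2 hrj_b.1 hrj_b.2 hfixi hfixj hcase
    have hnew : ∀ (k : Nat), k < n → ∃ rk, rootF (n + 2) p (k : Int) = some rk ∧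
        rootF (n + 2) p3 (k : Int) = some (if rk = ri then rj else rk) := by
      intro k hk
      obtain ⟨rk, hrk⟩ := hroots k hk
      refine ⟨rk, hrk, ?_⟩
      have h7 := HW2 (n + 2) (k : Int) rk (hpres12 _ _ _ hrk)
      exact rootF_norm hrok3 h7
    refine ⟨p3, comp.map fun c => if c = a then b else c,
      by rw [hA0, if_pos hcase, hset], by rw [hB0, if_pos hab], hrok3, ?_, ?_, ?_⟩
    · intro k hk
      obtain ⟨rk, _, h8⟩ := hnew k hk
      exact ⟨_, h8⟩
    · rw [List.length_map]; exact hclen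
    · intro x y hx hy
      obtain ⟨rx, hrx, hrx3⟩ := hnew x hx
      obtain ⟨ry, hry, hry3⟩ := hnew y hy
      obtain ⟨cx, hcx⟩ : ∃ cx, comp[x]? = some cx :=
        ⟨comp[x]'(by rw [hclen]; exact hx), List.getElem?_eq_getElem _⟩
      obtain ⟨cy, hcy⟩ : ∃ cy, comp[y]? = some cy :=
        ⟨comp[y]'(by rw [hclen]; exact hy), List.getElem?_eq_getElem _⟩
      have mkK : ∀ (z : Nat) (hz : z < n) (rz cz : Int), rootF (n + 2) p (z : Int) = some rz →
          comp[z]? = some cz → ∀ (s : Nat) (hs : s < n) (rs cs : Int),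
          rootF (n + 2) p (s : Int) = some rs → comp[s]? = some cs →
          (rz = rs ↔ cz = cs) := by
        intro z hz rz cz hrz hcz s hs rs cs hrs hcs
        have h9 := hiff z s hz hs
        rw [hrz, hrs, hcz, hcs] at h9
        constructor
        · intro h; exact Option.some.inj (h9.mp (by rw [h]))
        · intro h; exact Option.some.inj (h9.mpr (by rw [h]))
      have k1 := mkK x hx rx cx hrx hcx (slotNat n i) (slotNat_lt hi) ri a hri_s ha
      have k2 := mkK y hy ry cy hry hcy (slotNat n i) (slotNat_lt hi) ri a hri_s ha
      have k3 := mkK y hy ry cy hry hcy (slotNat n j) (slotNat_lt hj) rj b hrj_s hb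
      have k4 := mkK x hx rx cx hrx hcx (slotNat n j) (slotNat_lt hj) rj b hrj_s hb
      have k5 := mkK x hx rx cx hrx hcx y hy ry cy hry hcy
      rw [hrx3, hry3, List.getElem?_map, List.getElem?_map, hcx, hcy]
      simp only [Option.map_some]
      constructor
      · intro h
        have := (merge_iff k1 k2 k3 k4 k5).mp (Option.some.inj h)
        rw [this]
      · intro h
        have := (merge_iff k1 k2 k3 k4 k5).mpr (Option.some.inj h)
        rw [this]

-- ---- whole edge fold, in lockstep ----
theorem fold_lockstep {n : Nat} (edges : List (Int × Int)) :
    ∀ {p comp : List Int}, UFInv n p comp →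
    (∀ e ∈ edges, PySem.Raise.InRange n e.1 ∧ PySem.Raise.InRange n e.2) →
    ∃ pF compF,
      edges.foldl (fun acc e => acc.bind (fun p => unionA (n + 2) p e.1 e.2)) (some p) = some pF ∧
      edges.foldl (fun acc e => acc.bind (fun c => stepB c e.1 e.2)) (some comp) = some compF ∧
      UFInv n pF compF := by
  induction edges with
  | nil => intro p comp hI _; exact ⟨p, comp, rfl, rfl, hI⟩
  | cons e es ih =>
    intro p comp hI hall
    obtain ⟨p2, comp2, heqA, heqB, hI2⟩ :=
      union_step hI (hall e (List.mem_cons_self)).1 (hall e (List.mem_cons_self)).2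
    obtain ⟨pF, compF, hfA, hfB, hIF⟩ := ih hI2 (fun e' he' => hall e' (List.mem_cons_of_mem e he'))
    refine ⟨pF, compF, ?_, ?_, hIF⟩
    · rw [List.foldl_cons, Option.bind_some, heqA]; exact hfA
    · rw [List.foldl_cons, Option.bind_some, heqB]; exact hfB

-- ---- initial state ----
theorem pyRange_zero_eq (n : Nat) :
    PySem.List.pyRange 0 (n : Int) = List.map (fun (k : Nat) => (k : Int)) (List.range n) := by
  unfold PySem.List.pyRange
  rw [if_neg (by norm_num), if_pos (by norm_num : (0:Int) < 1)]
  by_cases h : (0 : Int) < (n : Int)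
  · rw [if_pos h]
    have hc : (((n : Int) - 0 + 1 - 1) / 1).toNat = n := by
      rw [Int.ediv_one]; omega
    rw [hc]
    dsimp only
    apply List.map_congr_left
    intro k _
    omega
  · rw [if_neg h]
    have : n = 0 := by omega
    subst this
    simp

theorem inv_init (n : Nat) : UFInv n (PySem.List.pyRange 0 (n : Int)) (PySem.List.pyRange 0 (n : Int)) := by
  rw [pyRange_zero_eq]
  set p0 : List Int := List.map (fun (k : Nat) => (k : Int)) (List.range n) with hp0
  have hget : ∀ k : Nat, k < n → PySem.List.pyGet? p0 (k : Int) = some (k : Int) := by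
    intro k hk
    rw [PySem.List.pyGet?_natCast, hp0]
    simp [hk]
  have hroot0 : ∀ k : Nat, k < n → rootF (n + 2) p0 (k : Int) = some (k : Int) := by
    intro k hk
    rw [show n + 2 = (n + 1) + 1 from rfl]
    exact rootF_of_fix (hget k hk)
  have hlen : p0.length = n := by rw [hp0]; simp
  refine ⟨⟨hlen, ?_⟩, fun k hk => ⟨(k : Int), hroot0 k hk⟩, hlen, ?_⟩
  · intro v hv
    rw [hp0] at hv
    obtain ⟨k, hk, rfl⟩ := List.mem_map.mp hv
    rw [List.mem_range] at hk
    constructor <;> [positivity; exact_mod_cast hk]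
  · intro x y hx hy
    rw [hroot0 x hx, hroot0 y hy, hp0]
    simp only [List.getElem?_map, List.getElem?_range, hx, hy]
    constructor
    · intro hh
      have : (x : Int) = (y : Int) := by simpa using hh
      simp [this]
    · intro hh
      have : (x : Int) = (y : Int) := by
        have := by simpa using hh
        exact_mod_cast this
      simpa using this

-- ---- beta_0 on A's side: the collected find results are the roots ----
def rootD (n : Nat) (p : List Int) (k : Nat) : Int := (rootF (n + 2) p (k : Int)).getD 0

theorem collect_roots {n : Nat} {p : List Int} (hr : Roots n p) :
    ∀ (l : List Nat), (∀ k ∈ l, k < n) → ∀ (q : List Int) (acc : List Int),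
      RangeOK n q → Pres p q →
      (List.foldl (fun (st : List Int × List Int) (k : Nat) =>
        match findA (n + 2) st.1 (k : Int) with
        | none => st
        | some pr => (pr.1, st.2 ++ [pr.2])) (q, acc) l).2 = acc ++ l.map (rootD n p) := by
  intro l
  induction l with
  | nil => intro _ q acc _ _; simp
  | cons k l ih =>
    intro hlt q acc hqok hqpres
    obtain ⟨rk, hrk⟩ := hr k (hlt k List.mem_cons_self)
    have hrkq : rootF (n + 2) q (k : Int) = some rk := hqpres _ _ _ hrk
    obtain ⟨q', hfind⟩ := findA_total hqok hrkq
    obtain ⟨_, hq'ok, hq'pres⟩ := findA_sound (n + 2) q (k : Int) (q', rk) hqok hfind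
    dsimp only at hq'ok hq'pres
    rw [List.foldl_cons]
    have hscrut : findA (n + 2) (q, acc).1 (k : Int) = some (q', rk) := hfind
    simp only [hscrut]
    rw [ih (fun k' hk' => hlt k' (List.mem_cons_of_mem k hk')) q' (acc ++ [rk]) hq'ok
        (fun f y r h => hq'pres f y r (hqpres f y r h))]
    have hrd : rootD n p k = rk := by unfold rootD; rw [hrk]; rfl
    rw [List.map_cons, hrd, List.append_assoc, List.singleton_append]

-- ---- counting classes ----
theorem card_classes (l : List Nat) (f g : Nat → Int)
    (h : ∀ a ∈ l, ∀ b ∈ l, (f a = f b ↔ g a = g b)) :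
    (PySem.Set.ofList (l.map f)).length = (PySem.Set.ofList (l.map g)).length := by
  induction l using List.reverseRecOn with
  | nil => rfl
  | append_singleton l a ih =>
    have hl : ∀ a ∈ l, ∀ b ∈ l, (f a = f b ↔ g a = g b) := fun a ha b hb =>
      h a (List.mem_append_left _ ha) b (List.mem_append_left _ hb)
    rw [List.map_append, List.map_append, List.map_singleton, List.map_singleton,
      PySem.Set.ofList_append_singleton, PySem.Set.ofList_append_singleton]
    have hmem : f a ∈ PySem.Set.ofList (l.map f) ↔ g a ∈ PySem.Set.ofList (l.map g) := by
      rw [PySem.Set.mem_ofList, PySem.Set.mem_ofList, List.mem_map, List.mem_map]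
      constructor
      · rintro ⟨b, hb, hfb⟩
        exact ⟨b, hb, ((h a (by simp) b (List.mem_append_left _ hb)).mp hfb.symm).symm⟩
      · rintro ⟨b, hb, hgb⟩
        exact ⟨b, hb, ((h a (by simp) b (List.mem_append_left _ hb)).mpr hgb.symm).symm⟩
    by_cases hm : f a ∈ PySem.Set.ofList (l.map f)
    · rw [PySem.Set.add_of_mem hm, PySem.Set.add_of_mem (hmem.mp hm)]
      exact ih hl
    · rw [PySem.Set.add_of_not_mem hm, PySem.Set.add_of_not_mem (fun hc => hm (hmem.mpr hc)),
        List.length_append, List.length_append, ih hl]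
      rfl

theorem list_recon {n : Nat} {l : List Int} (h : l.length = n) :
    (List.range n).map (fun k => l.getD k 0) = l := by
  apply List.ext_getElem
  · simp [h]
  · intro i h1 h2
    simp only [List.getElem_map, List.getElem_range]
    rw [List.getD_eq_getElem]

theorem beta0_eq {n : Nat} {p comp : List Int} (hI : UFInv n p comp) :
    (PySem.Set.ofList ((List.range n).map (rootD n p))).length =
    (PySem.Set.ofList comp).length := by
  obtain ⟨hrok, hroots, hclen, hiff⟩ := hI
  have hcc := card_classes (List.range n) (rootD n p) (fun k => comp.getD k 0) ?_
  · rw [hcc, list_recon hclen]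
  · intro a ha b hb
    rw [List.mem_range] at ha hb
    obtain ⟨ra, hra⟩ := hroots a ha
    obtain ⟨rb, hrb⟩ := hroots b hb
    have h6 := hiff a b ha hb
    rw [hra, hrb] at h6
    have hda : rootD n p a = ra := by unfold rootD; rw [hra]; rfl
    have hdb : rootD n p b = rb := by unfold rootD; rw [hrb]; rfl
    have hga : comp.getD a 0 = comp[a]'(by omega) := List.getD_eq_getElem _ _ (by omega)
    have hgb : comp.getD b 0 = comp[b]'(by omega) := List.getD_eq_getElem _ _ (by omega)
    show rootD n p a = rootD n p b ↔ comp.getD a 0 = comp.getD b 0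
    rw [hda, hdb, hga, hgb]
    constructor
    · intro hh
      have := h6.mp (by rw [hh])
      rw [List.getElem?_eq_getElem (by omega : a < comp.length),
        List.getElem?_eq_getElem (by omega : b < comp.length)] at this
      exact Option.some.inj this
    · intro hh
      have := h6.mpr (by
        rw [List.getElem?_eq_getElem (by omega : a < comp.length),
          List.getElem?_eq_getElem (by omega : b < comp.length), hh])
      exact Option.some.inj this

-- ===== VERDICT (by name: the statement is the Claim_ definition above) =====
theorem betti_numbers_spec : Claim_equal_betti_numbers := by
  intro vertices edges triangles _ hpre
  unfold Spec_betti_numbers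
  have hall : ∀ e ∈ edges, PySem.Raise.InRange vertices.length e.1 ∧
      PySem.Raise.InRange vertices.length e.2 := hpre
  obtain ⟨pF, compF, hfA, hfB, hIF⟩ :=
    fold_lockstep (n := vertices.length) edges (inv_init vertices.length) hall
  have hb0 := beta0_eq hIF
  obtain ⟨hrokF, hrootsF, hclenF, hiffF⟩ := hIF
  have hcollect := collect_roots hrootsF (List.range vertices.length)
    (fun k hk => List.mem_range.mp hk) pF [] hrokF (fun f y r h => h)
  unfold betti_numbers betti_numbers_alt
  dsimp only
  rw [hfA, hfB]
  dsimp only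
  rw [hcollect, List.nil_append]
  have hlen : PySem.Set.len (PySem.Set.ofList
        ((List.range vertices.length).map (rootD vertices.length pF)))
      = PySem.Set.len (PySem.Set.ofList compF) := by
    unfold PySem.Set.len
    exact_mod_cast hb0
  rw [hlen]
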